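-- pv_equiv track=rewrite | github.com/yangao-22/terraform-demo | tictactoe/tictactoe.py | player_choice
-- ===== SOURCE A (Python) =====
-- def format_board(rawboard):
--     newboard = []
--     for item in rawboard:
--         if item == 'X' or item == 'O':
--             newboard.append(item)
--         else:
--             newboard.append(' ')
--
--     while len(newboard) < 10:
--         newboard.append(' ')
--     newboard[0] = '#'
--     return newboard
--
-- def space_check(board, position):
--     formatedBoard = format_board(board)
--     return formatedBoard[position] == ' '
--
-- def player_choice(board):
--     index = 1
--     availableSpace = []
--     while index <= 9:
--         if space_check(board, index):
--             availableSpace.append(index)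
--         index = index + 1
--     return availableSpace
-- ===== SOURCE B (Python) =====
-- def player_choice(board):
--     cells = list(board)
--     return [p for p in range(1, 10)
--             if p >= len(cells) or cells[p] not in ('X', 'O')]
-- ===== Notes on version B (the rewrite author's own statement) =====
-- stated objective: simpler
-- what changed: Replace the per-position rebuild of the padded board (space_check calling format_board nine times) by one filtering pass over positions 1-9 that tests the raw cell directly, with positions beyond the list counting as free.
import Mathlib
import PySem

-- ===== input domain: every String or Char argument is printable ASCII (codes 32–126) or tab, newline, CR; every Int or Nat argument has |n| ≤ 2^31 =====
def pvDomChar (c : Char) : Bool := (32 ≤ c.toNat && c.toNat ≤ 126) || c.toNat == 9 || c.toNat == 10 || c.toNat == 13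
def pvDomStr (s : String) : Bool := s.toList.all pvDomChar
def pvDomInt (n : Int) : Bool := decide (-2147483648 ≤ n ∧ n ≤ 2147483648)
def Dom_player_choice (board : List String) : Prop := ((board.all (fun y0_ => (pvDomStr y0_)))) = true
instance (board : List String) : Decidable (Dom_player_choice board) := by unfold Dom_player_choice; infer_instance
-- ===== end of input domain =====

-- B replaces A's nine rebuilds of the padded board by one filter over positions 1-9 (objective: simpler).

-- ===== PORT A =====
-- while len(newboard) < 10: newboard.append(' ')
def pvPadTo10 (l : List String) : List String :=
  if l.length < 10 then pvPadTo10 (l ++ [" "]) else l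
termination_by 10 - l.length

def format_board (rawboard : List String) : List String :=
  let newboard := rawboard.foldl
    (fun nb item => nb ++ [if item = "X" ∨ item = "O" then item else " "]) []
  (pvPadTo10 newboard).set 0 "#"

def space_check (board : List String) (position : Int) : Bool :=
  PySem.List.pyGet? (format_board board) position = some " "

-- while index <= 9: …
def pvLoopA (board : List String) (index : Int) (acc : List Int) : List Int :=
  if index ≤ 9 then
    pvLoopA board (index + 1) (if space_check board index then acc ++ [index] else acc)
  else acc
termination_by (10 - index).toNat
decreasing_by omega

def player_choice (board : List String) : List Int :=
  pvLoopA board 1 []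

-- ===== PORT B =====
def pvFreeB (board : List String) (p : Int) : Bool :=
  decide ((board.length : Int) ≤ p) ||
    (!(PySem.List.pyGet? board p = some "X") && !(PySem.List.pyGet? board p = some "O"))

def player_choice_alt (board : List String) : List Int :=
  (PySem.List.pyRange 1 10 1).filter (pvFreeB board)

-- ===== PRECONDITION & SPEC =====
def Spec_player_choice (board : List String) (out : List Int) : Prop := out = player_choice_alt board
instance (board : List String) (out : List Int) : Decidable (Spec_player_choice board out) := by unfold Spec_player_choice; infer_instance

-- ===== CLAIM (what is proved, stated in full; the proofs are below) =====
def Claim_equal_player_choice : Prop := ∀ (board : List String), Dom_player_choice board → Spec_player_choice board (player_choice board)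

-- ===== LEMMAS AND PROOFS =====

theorem pvFoldl_map (f : String → String) (l : List String) (init : List String) :
    l.foldl (fun nb item => nb ++ [f item]) init = init ++ l.map f := by
  induction l generalizing init with
  | nil => simp
  | cons a t ih => simp [List.foldl, ih]

theorem pvPadTo10_eq (l : List String) :
    pvPadTo10 l = l ++ List.replicate (10 - l.length) " " := by
  by_cases h : l.length < 10
  · rw [pvPadTo10, if_pos h, pvPadTo10_eq (l ++ [" "])]
    simp only [List.length_append, List.length_cons, List.length_nil]
    have : 10 - l.length = (10 - (l.length + 1)) + 1 := by omega
    rw [this, List.replicate_succ, List.append_assoc]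
    simp
  · rw [pvPadTo10, if_neg h]
    have : 10 - l.length = 0 := by omega
    simp [this]
termination_by 10 - l.length

theorem pvSpace_check_eq (board : List String) (p : Int) (h1 : 1 ≤ p) (h9 : p ≤ 9) :
    space_check board p = pvFreeB board p := by
  have hm := pvFoldl_map (fun item => if item = "X" ∨ item = "O" then item else " ") board []
  simp only [List.nil_append] at hm
  unfold space_check format_board pvFreeB
  simp only [hm, pvPadTo10_eq]
  obtain ⟨k, rfl⟩ : ∃ k : Nat, p = (k : Int) := ⟨p.toNat, by omega⟩
  have hk1 : 1 ≤ k := by omega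
  have hk9 : k ≤ 9 := by omega
  rw [PySem.List.pyGet?_natCast, PySem.List.pyGet?_natCast]
  have hlen : ((board.map (fun item => if item = "X" ∨ item = "O" then item else " ")).length) = board.length := by simp
  by_cases hb : k < board.length
  · have hk' : k < (board.map (fun item => if item = "X" ∨ item = "O" then item else " ")).length := by simpa
    rw [List.getElem?_set_ne (by omega)]
    rw [List.getElem?_append_left (by simpa), List.getElem?_map]
    have hget : board[k]? = some board[k] := List.getElem?_eq_getElem hb
    rw [hget]
    simp only [Option.map_some]
    have : ¬ ((board.length : Int) ≤ (k : Int)) := by omega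
    simp only [this, decide_false, Bool.false_or]
    by_cases hx : board[k] = "X"
    · simp [hx]
    · by_cases ho : board[k] = "O"
      · simp [ho]
      · simp [hx, ho]
  · -- padding region: formatted board has ' ' at k, raw board out of range
    rw [List.getElem?_set_ne (by omega)]
    have hlen2 : k < ((board.map (fun item => if item = "X" ∨ item = "O" then item else " ")) ++ List.replicate (10 - board.length) " ").length := by
      simp; omega
    rw [List.getElem?_append_right (by simp; omega)]
    have : (List.replicate (10 - board.length) (" " : String))[k - board.length]? = some " " := by
      rw [List.getElem?_replicate]
      have : k - board.length < 10 - board.length := by omega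
      simp [this]
    simp only [hlen, this]
    have hge : ((board.length : Int) ≤ (k : Int)) := by omega
    have hnone : board[k]? = none := List.getElem?_eq_none (by omega)
    simp [hge, hnone]

theorem pvLoopA_eq (board : List String) :
    ∀ (n : Nat) (i : Int) (acc : List Int), 1 ≤ i → i = 10 - (n : Int) →
      pvLoopA board i acc = acc ++ (PySem.List.pyRange i 10 1).filter (pvFreeB board) := by
  intro n
  induction n with
  | zero =>
    intro i acc h1 hi
    rw [pvLoopA, if_neg (by omega)]
    have : PySem.List.pyRange i 10 1 = [] := by
      have := PySem.List.pyRange_one i 10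
      rw [this]
      have : ((10 : Int) - i).toNat = 0 := by omega
      simp [this]
    simp [this]
  | succ m ih =>
    intro i acc h1 hi
    have hi9 : i ≤ 9 := by push_cast at hi; omega
    rw [pvLoopA, if_pos (by omega)]
    rw [ih (i + 1) _ (by omega) (by push_cast at hi ⊢; omega)]
    conv_rhs => rw [PySem.List.pyRange_one_cons (by omega), List.filter_cons]
    rw [pvSpace_check_eq board i h1 hi9]
    by_cases hc : pvFreeB board i = true
    · simp [hc]
    · simp [hc]

-- ===== VERDICT (by name: the statement is the Claim_ definition above) =====
theorem player_choice_spec : Claim_equal_player_choice := by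
  intro board _
  unfold Spec_player_choice player_choice player_choice_alt
  have := pvLoopA_eq board 9 1 [] (by omega) (by norm_num)
  simpa using this
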